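-- pv_equiv track=rewrite | github.com/Kar-24/Audio-Based-Math-Solver | src/math_calculator.py | _split_linear_terms
-- ===== SOURCE A (Python) =====
-- from typing import Dict, List, Optional, Tuple
--
-- def _split_linear_terms(expr: str) -> List[str]:
--     expr = expr.replace(' ', '')
--     terms = []
--     i = 0
--     while i < len(expr):
--         sign = ''
--         if expr[i] in '+-':
--             sign = expr[i]
--             i += 1
--         start = i
--         while i < len(expr) and expr[i] not in '+-':
--             i += 1
--         term = sign + expr[start:i]
--         if term:
--             terms.append(term)
--     return terms
-- ===== SOURCE B (Python) =====
-- def _split_linear_terms(expr):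
--     # Tokenize into an alternating [chunk, sign, chunk, sign, ..., chunk] list
--     # (like re.split(r'([+-])', ...)), then pair each sign with the following chunk.
--     s = expr.replace(' ', '')
--     parts = ['']
--     for c in s:
--         if c in '+-':
--             parts.append(c)
--             parts.append('')
--         else:
--             parts[-1] += c
--     terms = []
--     if parts[0]:
--         terms.append(parts[0])
--     for j in range(1, len(parts), 2):
--         terms.append(parts[j] + parts[j + 1])
--     return terms
-- ===== Notes on version B (the rewrite author's own statement) =====
-- stated objective: alternative
-- what changed: Replaces A's nested-while index scan with a single tokenizing pass into an alternating [chunk, sign, chunk, ...] list followed by a pass pairing each sign with its following chunk.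
import Mathlib
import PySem

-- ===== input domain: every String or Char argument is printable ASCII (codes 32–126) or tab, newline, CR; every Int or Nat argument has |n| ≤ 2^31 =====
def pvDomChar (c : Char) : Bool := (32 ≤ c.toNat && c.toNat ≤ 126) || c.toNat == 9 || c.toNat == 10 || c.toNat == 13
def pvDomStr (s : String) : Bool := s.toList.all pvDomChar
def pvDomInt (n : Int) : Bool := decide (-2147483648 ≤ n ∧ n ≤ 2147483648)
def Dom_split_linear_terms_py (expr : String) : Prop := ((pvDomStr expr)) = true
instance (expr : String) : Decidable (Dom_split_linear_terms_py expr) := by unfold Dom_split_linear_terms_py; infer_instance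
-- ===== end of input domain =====

-- B re-tokenizes with a single pass into an alternating [chunk, sign, chunk, ...] list and
-- a pairing pass, instead of A's manual nested-while scan; objective: alternative decomposition.

-- ===== PORT A =====
-- A's outer while loop: at each position, optionally consume a sign, then consume the maximal
-- run of non-sign characters (the inner while = takeWhile/dropWhile), append sign+chunk if nonempty.
-- The term is kept as a List Char and converted by String.mk when appended (same value as A's str).
def pvNotSign (c : Char) : Bool := c ≠ '+' && c ≠ '-'

def pvAGo : List Char → List String
  | [] => []
  | c :: rest =>
    if h : c = '+' ∨ c = '-' then
      -- sign consumed; chunk is the maximal non-sign run after it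
      let term := c :: rest.takeWhile pvNotSign
      if term = [] then pvAGo (rest.dropWhile pvNotSign)
      else String.mk term :: pvAGo (rest.dropWhile pvNotSign)
    else
      let term := (c :: rest).takeWhile pvNotSign
      if term = [] then pvAGo ((c :: rest).dropWhile pvNotSign)
      else String.mk term :: pvAGo ((c :: rest).dropWhile pvNotSign)
  termination_by ds => ds.length
  decreasing_by
  · simp only [List.length_cons]
    exact Nat.lt_succ_of_le (List.length_dropWhile_le pvNotSign rest)
  · simp only [List.length_cons]
    exact Nat.lt_succ_of_le (List.length_dropWhile_le pvNotSign rest)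
  · have hns : pvNotSign c = true := by
      simp only [pvNotSign, Bool.and_eq_true, decide_eq_true_eq]
      exact ⟨fun hh => h (Or.inl hh), fun hh => h (Or.inr hh)⟩
    simp only [List.dropWhile_cons, hns, if_pos, List.length_cons]
    exact Nat.lt_succ_of_le (List.length_dropWhile_le pvNotSign rest)
  · have hns : pvNotSign c = true := by
      simp only [pvNotSign, Bool.and_eq_true, decide_eq_true_eq]
      exact ⟨fun hh => h (Or.inl hh), fun hh => h (Or.inr hh)⟩
    simp only [List.dropWhile_cons, hns, if_pos, List.length_cons]
    exact Nat.lt_succ_of_le (List.length_dropWhile_le pvNotSign rest)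

def split_linear_terms_py (expr : String) : List String :=
  pvAGo (PySem.Str.replace expr " " "").toList    -- expr.replace(' ', '')

-- ===== PORT B =====
def pvIsSign (c : Char) : Bool := c = '+' || c = '-'

-- B's tokenizing loop (current chunk grows at the front of the reversed parts list):
-- 'parts.append(c); parts.append('')' / 'parts[-1] += c', starting from [''], then reversed.
def pvBStep (ps : List (List Char)) (c : Char) : List (List Char) :=
  if pvIsSign c then [] :: [c] :: ps
  else match ps with
    | h :: t => (h ++ [c]) :: t
    | [] => [[c]]   -- unreachable: the accumulator starts nonempty

-- B's pairing pass: terms.append(parts[j] + parts[j+1]) for j = 1, 3, 5, …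
def pvPairUp : List (List Char) → List String
  | s :: t :: r => String.mk (s ++ t) :: pvPairUp r
  | _ => []

def split_linear_terms_py_alt (expr : String) : List String :=
  let cs := (PySem.Str.replace expr " " "").toList   -- expr.replace(' ', '')
  let parts := (cs.foldl pvBStep [[]]).reverse
  match parts with
  | [] => []                                          -- unreachable
  | p0 :: rest => (if p0 = [] then [] else [String.mk p0]) ++ pvPairUp rest

-- ===== PRECONDITION & SPEC =====
def Spec_split_linear_terms_py (expr : String) (out : List String) : Prop := out = split_linear_terms_py_alt expr
instance (expr : String) (out : List String) : Decidable (Spec_split_linear_terms_py expr out) := by unfold Spec_split_linear_terms_py; infer_instance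

-- ===== CLAIM (what is proved, stated in full; the proofs are below) =====
def Claim_equal_split_linear_terms_py : Prop := ∀ (expr : String), Dom_split_linear_terms_py expr → Spec_split_linear_terms_py expr (split_linear_terms_py expr)

-- ===== LEMMAS AND PROOFS =====

-- recursive characterization of B's tokenizer (proof-side only)
def pvBSplit : List Char → List (List Char)
  | [] => [[]]
  | c :: rest =>
    if pvIsSign c then [] :: [c] :: pvBSplit rest
    else match pvBSplit rest with
      | h :: t => (c :: h) :: t
      | [] => [[c]]

lemma pvBSplit_ne_nil (cs : List Char) : pvBSplit cs ≠ [] := by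
  cases cs with
  | nil => simp [pvBSplit]
  | cons c rest =>
    simp only [pvBSplit]
    split
    · simp
    · cases h : pvBSplit rest <;> simp

def pvConsHead (h : List Char) : List (List Char) → List (List Char)
  | x :: t => (h ++ x) :: t
  | [] => []

lemma pvFoldl_bstep (cs : List Char) : ∀ (h : List Char) (ps : List (List Char)),
    (cs.foldl pvBStep (h :: ps)).reverse = ps.reverse ++ pvConsHead h (pvBSplit cs) := by
  induction cs with
  | nil => intro h ps; simp [pvBSplit, pvConsHead]
  | cons c rest ih =>
    intro h ps
    by_cases hc : pvIsSign c = true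
    · have : List.foldl pvBStep (h :: ps) (c :: rest)
          = List.foldl pvBStep ([] :: [c] :: h :: ps) rest := by
        simp [List.foldl_cons, pvBStep, hc]
      rw [this, ih [] ([c] :: h :: ps)]
      obtain ⟨x, t, hx⟩ : ∃ x t, pvBSplit rest = x :: t := by
        cases hb : pvBSplit rest with
        | nil => exact absurd hb (pvBSplit_ne_nil rest)
        | cons x t => exact ⟨x, t, rfl⟩
      simp [pvBSplit, hc, hx, pvConsHead]
    · have : List.foldl pvBStep (h :: ps) (c :: rest)
          = List.foldl pvBStep ((h ++ [c]) :: ps) rest := by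
        simp [List.foldl_cons, pvBStep, hc]
      rw [this, ih (h ++ [c]) ps]
      obtain ⟨x, t, hx⟩ : ∃ x t, pvBSplit rest = x :: t := by
        cases hb : pvBSplit rest with
        | nil => exact absurd hb (pvBSplit_ne_nil rest)
        | cons x t => exact ⟨x, t, rfl⟩
      simp [pvBSplit, hc, hx, pvConsHead]

-- tail shape of the split after the first chunk
def pvRs : List Char → List (List Char)
  | [] => []
  | s :: r => [s] :: pvBSplit r

lemma pvBSplit_eq (cs : List Char) :
    pvBSplit cs = cs.takeWhile pvNotSign :: pvRs (cs.dropWhile pvNotSign) := by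
  induction cs with
  | nil => simp [pvBSplit, pvRs]
  | cons c rest ih =>
    by_cases hc : pvIsSign c = true
    · have hn : pvNotSign c = false := by
        simp [pvIsSign] at hc; rcases hc with h | h <;> simp [pvNotSign, h]
      simp [pvBSplit, hc, hn, pvRs]
    · have hn : pvNotSign c = true := by
        simp [pvIsSign] at hc; simp [pvNotSign, hc]
      simp only [pvBSplit, hc, if_neg, List.takeWhile_cons, List.dropWhile_cons, hn, if_true, ih]
      simp

lemma pvDropWhile_shape (l : List Char) :
    l.dropWhile pvNotSign = [] ∨
      ∃ c r, l.dropWhile pvNotSign = c :: r ∧ pvNotSign c = false := by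
  induction l with
  | nil => left; rfl
  | cons c rest ih =>
    by_cases hc : pvNotSign c = true
    · simpa [List.dropWhile_cons, hc] using ih
    · right
      exact ⟨c, rest, by simp [hc], by simpa using hc⟩

-- key: on a sign-headed (or empty) remainder, A's scan equals B's pairing of the split tail
lemma pvKeyAux : ∀ (n : Nat) (ds : List Char), ds.length ≤ n →
    (ds = [] ∨ ∃ c r, ds = c :: r ∧ pvNotSign c = false) →
    pvAGo ds = pvPairUp (pvRs ds) := by
  intro n
  induction n with
  | zero =>
    intro ds hlen _
    have : ds = [] := List.length_eq_zero_iff.mp (Nat.le_zero.mp hlen)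
    subst this; simp [pvAGo, pvRs, pvPairUp]
  | succ n ih =>
    rintro ds hlen (rfl | ⟨c, r, rfl, hc⟩)
    · simp [pvAGo, pvRs, pvPairUp]
    · have hsign : c = '+' ∨ c = '-' := by
        by_contra h; push_neg at h; simp [pvNotSign, h.1, h.2] at hc
      have hrec : pvAGo (r.dropWhile pvNotSign) = pvPairUp (pvRs (r.dropWhile pvNotSign)) := by
        exact ih (r.dropWhile pvNotSign)
          (le_trans (List.length_dropWhile_le pvNotSign r) (by simpa using hlen))
          (pvDropWhile_shape r)
      calc pvAGo (c :: r)
          = String.mk (c :: r.takeWhile pvNotSign) :: pvAGo (r.dropWhile pvNotSign) := by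
            rw [pvAGo]; simp [hsign]
        _ = pvPairUp (pvRs (c :: r)) := by
            rw [hrec, pvRs, pvBSplit_eq r]
            simp [pvPairUp]

lemma pvKey (ds : List Char) (h : ds = [] ∨ ∃ c r, ds = c :: r ∧ pvNotSign c = false) :
    pvAGo ds = pvPairUp (pvRs ds) := pvKeyAux ds.length ds le_rfl h

lemma pvMain (cs : List Char) :
    pvAGo cs = (match (cs.foldl pvBStep [[]]).reverse with
      | [] => []
      | p0 :: rest => (if p0 = [] then [] else [String.mk p0]) ++ pvPairUp rest) := by
  have hfold : (cs.foldl pvBStep [[]]).reverse = pvConsHead [] (pvBSplit cs) := by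
    simpa using pvFoldl_bstep cs [] []
  obtain ⟨x, t, hx⟩ : ∃ x t, pvBSplit cs = x :: t := by
    cases hb : pvBSplit cs with
    | nil => exact absurd hb (pvBSplit_ne_nil cs)
    | cons x t => exact ⟨x, t, rfl⟩
  rw [hfold, hx]
  simp only [pvConsHead, List.nil_append]
  have hx' := (pvBSplit_eq cs).symm.trans hx
  -- hx' : cs.takeWhile pvNotSign :: pvRs (cs.dropWhile pvNotSign) = x :: t
  obtain ⟨hx1, hx2⟩ : cs.takeWhile pvNotSign = x ∧ pvRs (cs.dropWhile pvNotSign) = t := by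
    exact ⟨(List.cons.injEq _ _ _ _ ▸ hx').1, (List.cons.injEq _ _ _ _ ▸ hx').2⟩
  subst hx1; subst hx2
  cases cs with
  | nil => simp [pvAGo, pvRs, pvPairUp]
  | cons c rest =>
    by_cases hc : pvNotSign c = true
    · have hns : ¬ (c = '+' ∨ c = '-') := by
        intro h; rcases h with h | h <;> simp [pvNotSign, h] at hc
      have h1 : (c :: rest).takeWhile pvNotSign = c :: rest.takeWhile pvNotSign := by
        simp [hc]
      have h2 : (c :: rest).dropWhile pvNotSign = rest.dropWhile pvNotSign := by
        simp [hc]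
      rw [pvAGo]
      simp only [hns, dite_false, h1, h2]
      rw [pvKey (rest.dropWhile pvNotSign) (pvDropWhile_shape rest)]
      simp
    · have hsign : c = '+' ∨ c = '-' := by
        by_contra h; push_neg at h; simp [pvNotSign, h.1, h.2] at hc
      have h1 : (c :: rest).takeWhile pvNotSign = [] := by
        simp [hc]
      have h2 : (c :: rest).dropWhile pvNotSign = c :: rest := by
        simp [hc]
      rw [h1, h2, if_pos rfl,
        pvKey (c :: rest) (Or.inr ⟨c, rest, rfl, by simpa using hc⟩)]
      simp

-- ===== VERDICT (by name: the statement is the Claim_ definition above) =====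
theorem split_linear_terms_py_spec : Claim_equal_split_linear_terms_py := by
  intro expr _
  unfold Spec_split_linear_terms_py split_linear_terms_py split_linear_terms_py_alt
  exact pvMain _
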